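-- pv_equiv track=rewrite | github.com/adamconrad7/Naive-Bayes | classifier.py | featurize
-- ===== SOURCE A (Python) =====
-- def featurize(tuples, vocab):
--     featurized = []
--     for tuple in tuples:
--         sentence = sorted(set(tuple[0].split()))
--         features = []
--         for word in vocab:
--             if word in sentence:
--                 features.append(1)
--             else:
--                 features.append(0)
--         features.append(tuple[1])
--         featurized.append(features)
--     return featurized
-- ===== SOURCE B (Python) =====
-- def featurize(tuples, vocab):
--     index = {}
--     for i, w in enumerate(vocab):
--         index.setdefault(w, []).append(i)
--     featurized = []
--     for t in tuples:
--         features = [0] * len(vocab)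
--         for word in set(t[0].split()):
--             for j in index.get(word, []):
--                 features[j] = 1
--         features.append(t[1])
--         featurized.append(features)
--     return featurized
-- ===== Notes on version B (the rewrite author's own statement) =====
-- stated objective: alternative
-- what changed: B builds a word-to-positions dict from vocab once and fills a preallocated zero row from the sentence's word set, instead of A's per-vocab-word membership scan of each sorted sentence list.
import Mathlib
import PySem

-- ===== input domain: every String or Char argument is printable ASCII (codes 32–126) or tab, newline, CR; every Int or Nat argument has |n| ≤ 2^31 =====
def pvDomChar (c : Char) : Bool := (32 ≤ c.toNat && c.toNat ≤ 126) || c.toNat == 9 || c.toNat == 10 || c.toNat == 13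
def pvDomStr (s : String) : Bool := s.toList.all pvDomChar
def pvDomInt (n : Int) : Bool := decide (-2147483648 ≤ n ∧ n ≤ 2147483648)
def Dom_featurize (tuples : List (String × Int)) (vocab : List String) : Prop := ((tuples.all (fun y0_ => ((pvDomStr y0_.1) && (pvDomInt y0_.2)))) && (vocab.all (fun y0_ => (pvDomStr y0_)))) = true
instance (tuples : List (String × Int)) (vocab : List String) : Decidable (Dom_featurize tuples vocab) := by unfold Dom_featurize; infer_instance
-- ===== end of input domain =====

-- B replaces A's per-vocab membership scan of each sentence by a vocab-word → index-positions
-- dict built once, then fills a zero row from the sentence's word set (objective: alternative).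

-- ===== PORT A =====
def featurize (tuples : List (String × Int)) (vocab : List String) : List (List Int) :=
  tuples.foldl (fun featurized t =>
    let sentence := PySem.List.sorted (PySem.Set.ofList (PySem.Str.split₀ t.1)) (fun x => x) false
    let features := vocab.foldl (fun features word =>
      if word ∈ sentence then features ++ [(1 : Int)] else features ++ [(0 : Int)]) []
    featurized ++ [features ++ [t.2]]) []

-- ===== PORT B =====
def featurize_alt (tuples : List (String × Int)) (vocab : List String) : List (List Int) :=
  let index : PySem.Dict String (List Int) :=
    (PySem.List.enumerate vocab 0).foldl
      (fun d p => d.modify p.2 [] (fun js => js ++ [p.1])) PySem.Dict.empty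
  tuples.foldl (fun featurized t =>
    let features := PySem.List.pyRepeat [(0 : Int)] (vocab.length : Int)
    let features := (PySem.Set.ofList (PySem.Str.split₀ t.1)).foldl
      (fun fs word => (index.getD word []).foldl
        (fun fs j => PySem.List.pySetD fs j 1) fs) features
    featurized ++ [features ++ [t.2]]) []

-- ===== PRECONDITION & SPEC =====
def Spec_featurize (tuples : List (String × Int)) (vocab : List String) (out : List (List Int)) : Prop := out = featurize_alt tuples vocab
instance (tuples : List (String × Int)) (vocab : List String) (out : List (List Int)) : Decidable (Spec_featurize tuples vocab out) := by unfold Spec_featurize; infer_instance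

-- ===== CLAIM (what is proved, stated in full; the proofs are below) =====
def Claim_equal_featurize : Prop := ∀ (tuples : List (String × Int)) (vocab : List String), Dom_featurize tuples vocab → Spec_featurize tuples vocab (featurize tuples vocab)

-- ===== LEMMAS AND PROOFS =====

-- B's index, as a function of the looked-up word.
def pvIdx (vocab : List String) (w : String) : List Int :=
  (((PySem.List.enumerate vocab 0).foldl
      (fun d p => d.modify p.2 [] (fun js => js ++ [p.1])) PySem.Dict.empty).getD w [])

-- The positions stored for word w are the first components of the enumerate pairs carrying w.
theorem pvIdx_eq (vocab : List String) (w : String) :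
    pvIdx vocab w
      = (((PySem.List.enumerate vocab 0).filter (fun p => p.2 == w)).map (fun p => p.1)) := by
  unfold pvIdx
  have h := PySem.Dict.getD_foldl_modify_append
      ((PySem.List.enumerate vocab 0).map (fun p => (p.2, p.1))) PySem.Dict.empty w
  rw [List.foldl_map] at h
  simp only [List.filter_map, List.map_map] at h
  simpa using h

-- Every stored position is a natural number below len(vocab).
theorem pvIdx_shape (vocab : List String) (w : String) :
    ∀ j ∈ pvIdx vocab w, ∃ m : Nat, j = (m : Int) ∧ m < vocab.length := by
  rw [pvIdx_eq]
  intro j hj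
  simp only [List.mem_map, List.mem_filter] at hj
  obtain ⟨p, ⟨hp, -⟩, rfl⟩ := hj
  rw [PySem.List.mem_enumerate_iff] at hp
  obtain ⟨k, hk, rfl⟩ := hp
  exact ⟨k, by simp, hk⟩

-- Position k is stored under w exactly when vocab[k] = w.
theorem pvIdx_mem_iff (vocab : List String) (w : String) (k : Nat) (hk : k < vocab.length) :
    ((k : Int) ∈ pvIdx vocab w) ↔ vocab[k] = w := by
  rw [pvIdx_eq]
  simp only [List.mem_map, List.mem_filter, PySem.List.mem_enumerate_iff]
  constructor
  · rintro ⟨p, ⟨⟨m, hm, rfl⟩, hw⟩, hfst⟩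
    simp only [beq_iff_eq] at hw
    simp only [zero_add] at hfst
    have : m = k := by exact_mod_cast hfst
    subst this; exact hw
  · intro hw
    exact ⟨((k : Int), vocab[k]), ⟨⟨k, hk, by simp⟩, by simp [hw]⟩, rfl⟩

-- Setting the positions js (all canonical in-range naturals) to 1 keeps the
-- length and makes entry k equal to 1 exactly when k occurs in js.
theorem pvSetOnes_spec (js : List Int) : ∀ (fs : List Int),
    (∀ j ∈ js, ∃ m : Nat, j = (m : Int) ∧ m < fs.length) →
    (js.foldl (fun fs j => PySem.List.pySetD fs j 1) fs).length = fs.length ∧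
    ∀ (k : Nat), k < fs.length →
      (js.foldl (fun fs j => PySem.List.pySetD fs j 1) fs)[k]?
        = if (k : Int) ∈ js then some 1 else fs[k]? := by
  induction js with
  | nil => intro fs _; simp
  | cons j rest ih =>
    intro fs h
    obtain ⟨m, rfl, hm⟩ := h j (List.mem_cons_self ..)
    have hset : PySem.List.pySetD fs (m : Int) 1 = fs.set m 1 := by
      simp [PySem.List.pySetD, PySem.List.pySet?_natCast fs m 1 hm]
    have hlen : (fs.set m 1).length = fs.length := by simp
    have ih' := ih (fs.set m 1) (by
      intro j hj
      obtain ⟨m', hj', hm'⟩ := h j (List.mem_cons_of_mem _ hj)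
      exact ⟨m', hj', by simpa [hlen] using hm'⟩)
    refine ⟨?_, ?_⟩
    · simp only [List.foldl_cons, hset, ih'.1, hlen]
    · intro k hk
      simp only [List.foldl_cons, hset]
      rw [ih'.2 k (by omega)]
      by_cases hkr : (k : Int) ∈ rest
      · simp [hkr]
      · by_cases hkm : k = m
        · subst hkm
          simp [hkr, hm]
        · have hne : ((k : Int) = (m : Int)) ↔ False := by
            constructor
            · intro hh; exact hkm (by exact_mod_cast hh)
            · exact False.elim
          simp [hkr, hne, Ne.symm hkm]

-- Folding the ones-setting step over a word list S: entry k becomes 1 exactly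
-- when some word of S stores position k, length unchanged.
theorem pvRow_spec (vocab : List String) (S : List String) : ∀ (fs : List Int),
    fs.length = vocab.length →
    (S.foldl (fun fs w => (pvIdx vocab w).foldl
        (fun fs j => PySem.List.pySetD fs j 1) fs) fs).length = fs.length ∧
    ∀ (k : Nat), k < fs.length →
      (S.foldl (fun fs w => (pvIdx vocab w).foldl
          (fun fs j => PySem.List.pySetD fs j 1) fs) fs)[k]?
        = if ∃ w ∈ S, (k : Int) ∈ pvIdx vocab w then some 1 else fs[k]? := by
  induction S with
  | nil => intro fs _; simp
  | cons w rest ih =>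
    intro fs hlen
    have hshape : ∀ j ∈ pvIdx vocab w, ∃ m : Nat, j = (m : Int) ∧ m < fs.length := by
      intro j hj; obtain ⟨m, hj', hm⟩ := pvIdx_shape vocab w j hj
      exact ⟨m, hj', by omega⟩
    have hone := pvSetOnes_spec (pvIdx vocab w) fs hshape
    set fs' := (pvIdx vocab w).foldl (fun fs j => PySem.List.pySetD fs j 1) fs with hfs'
    have ih' := ih fs' (by rw [hone.1, hlen])
    refine ⟨?_, ?_⟩
    · simp only [List.foldl_cons, ← hfs', ih'.1, hone.1]
    · intro k hk
      simp only [List.foldl_cons, ← hfs']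
      rw [ih'.2 k (by rw [hone.1]; exact hk), hone.2 k hk]
      by_cases hrest : ∃ w' ∈ rest, (k : Int) ∈ pvIdx vocab w'
      · simp [hrest]
      · by_cases hw : (k : Int) ∈ pvIdx vocab w
        · simp [hrest, hw]
        · simp [hrest, hw]

theorem featurize_eq_alt (tuples : List (String × Int)) (vocab : List String) :
    featurize tuples vocab = featurize_alt tuples vocab := by
  unfold featurize featurize_alt
  rw [PySem.List.foldl_append_singleton_eq_map, PySem.List.foldl_append_singleton_eq_map]
  simp only [List.nil_append]
  apply List.map_congr_left
  intro t _
  apply congrArg (fun l => l ++ [t.2])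
  -- A's row is a map over vocab keyed on plain split-membership
  have hbody : ∀ (features : List Int) (word : String),
      (if word ∈ PySem.List.sorted (PySem.Set.ofList (PySem.Str.split₀ t.1)) (fun x => x) false
       then features ++ [(1 : Int)] else features ++ [(0 : Int)])
      = features ++ [if word ∈ PySem.Str.split₀ t.1 then (1 : Int) else 0] := by
    intro fs w
    by_cases h : w ∈ PySem.Str.split₀ t.1 <;>
      simp [h, PySem.List.mem_sorted, PySem.Set.mem_ofList]
  simp only [hbody]
  rw [PySem.List.foldl_append_singleton_eq_map]
  -- B's row via pvRow_spec
  rw [PySem.List.pyRepeat_singleton]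
  simp only [← pvIdx.eq_def]
  have hrepl : (List.replicate (vocab.length : Int).toNat (0 : Int)).length = vocab.length := by
    simp
  have hrow := pvRow_spec vocab (PySem.Set.ofList (PySem.Str.split₀ t.1))
      (List.replicate (vocab.length : Int).toNat (0 : Int)) hrepl
  apply List.ext_getElem?
  intro k
  by_cases hk : k < vocab.length
  · rw [List.nil_append]
    have hget : (vocab.map (fun word =>
        if word ∈ PySem.Str.split₀ t.1 then (1 : Int) else 0))[k]?
        = some (if vocab[k] ∈ PySem.Str.split₀ t.1 then (1 : Int) else 0) := by
      simp [List.getElem?_eq_getElem hk]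
    rw [hget, hrow.2 k (by omega)]
    have hcond : (∃ w ∈ PySem.Set.ofList (PySem.Str.split₀ t.1), (k : Int) ∈ pvIdx vocab w)
        ↔ vocab[k] ∈ PySem.Str.split₀ t.1 := by
      constructor
      · rintro ⟨w, hw, hkw⟩
        have := (pvIdx_mem_iff vocab w k hk).mp hkw
        rw [this]
        exact (PySem.Set.mem_ofList _ _).mp hw
      · intro h
        exact ⟨vocab[k], (PySem.Set.mem_ofList _ _).mpr h,
          (pvIdx_mem_iff vocab vocab[k] k hk).mpr rfl⟩
    by_cases h : vocab[k] ∈ PySem.Str.split₀ t.1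
    · rw [if_pos h, if_pos (hcond.mpr h)]
    · rw [if_neg h, if_neg (fun hh => h (hcond.mp hh))]
      simp [hk]
  · rw [List.nil_append]
    have h1 : (vocab.map (fun word =>
        if word ∈ PySem.Str.split₀ t.1 then (1 : Int) else 0))[k]? = none := by
      simp; omega
    have h2 : ((PySem.Set.ofList (PySem.Str.split₀ t.1)).foldl
        (fun fs word => (pvIdx vocab word).foldl (fun fs j => PySem.List.pySetD fs j 1) fs)
        (List.replicate (vocab.length : Int).toNat (0 : Int)))[k]? = none := by
      rw [List.getElem?_eq_none]
      rw [hrow.1, hrepl]; omega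
    rw [h1, h2]

-- ===== VERDICT (by name: the statement is the Claim_ definition above) =====
theorem featurize_spec : Claim_equal_featurize := by
  intro tuples vocab _
  unfold Spec_featurize
  exact featurize_eq_alt tuples vocab
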